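-- pv_equiv track=rewrite | github.com/asabdulkareem/MODULE-5-IntroductiontoProblemSolving-Intermediate-2 | Python/src/day45/Exercise.py | ex2ModArray
-- ===== SOURCE A (Python) =====
-- def ex2ModArray(A, B):
--     n = len(A)
--     exp = 1
--     ans = 0
--     for i in range(n-1, -1, -1):
--         ans = (ans + exp*(A[i]%B))%B
--         exp = exp * 10 % B
--     return int(ans)
-- ===== SOURCE B (Python) =====
-- def ex2ModArray(A, B):
--     ans = 0
--     for d in A:
--         ans = (ans * 10 + d) % B
--     return int(ans)
-- ===== Notes on version B (the rewrite author's own statement) =====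
-- stated objective: simpler
-- what changed: Horner's method: one left-to-right pass with a single accumulator ans=(ans*10+d)%B, eliminating the running power-of-ten variable, the extra per-digit multiply/mod, and the reversed index loop of A.
import Mathlib
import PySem

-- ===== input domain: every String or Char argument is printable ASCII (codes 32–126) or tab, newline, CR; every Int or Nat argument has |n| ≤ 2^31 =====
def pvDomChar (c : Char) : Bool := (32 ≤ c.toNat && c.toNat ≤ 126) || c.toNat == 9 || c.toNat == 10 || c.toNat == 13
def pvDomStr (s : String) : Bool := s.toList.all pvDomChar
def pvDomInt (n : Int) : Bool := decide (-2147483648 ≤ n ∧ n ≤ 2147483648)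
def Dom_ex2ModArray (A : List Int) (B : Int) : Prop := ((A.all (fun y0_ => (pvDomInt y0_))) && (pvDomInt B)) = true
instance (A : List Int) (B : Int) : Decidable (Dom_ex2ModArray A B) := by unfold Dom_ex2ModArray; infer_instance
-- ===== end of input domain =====

-- B replaces A's reversed index loop with a running power of ten by Horner's method:
-- a single left-to-right pass keeping only one accumulator (simpler, same cost).


-- ===== PORT A =====
def ex2ModArray (A : List Int) (B : Int) : Int :=
  let n : Int := A.length
  let st := (PySem.List.pyRange (n - 1) (-1) (-1)).foldl
    (fun (p : Int × Int) i =>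
      (PySem.Int.mod (p.1 * 10) B,
       PySem.Int.mod (p.2 + p.1 * PySem.Int.mod (PySem.List.pyGetD A i 0) B) B))
    (1, 0)
  st.2

-- ===== PORT B =====
def ex2ModArray_alt (A : List Int) (B : Int) : Int :=
  A.foldl (fun ans d => PySem.Int.mod (ans * 10 + d) B) 0

-- ===== PRECONDITION & SPEC =====
-- Pre_ excludes exactly the inputs where Python A raises ZeroDivisionError: B = 0 with a
-- nonempty digit list (the `% B` in the loop body); A returns normally everywhere else.
def Pre_ex2ModArray (A : List Int) (B : Int) : Prop := A = [] ∨ B ≠ 0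
instance (A : List Int) (B : Int) : Decidable (Pre_ex2ModArray A B) := by unfold Pre_ex2ModArray; infer_instance
def pvWitness_ex2ModArray : List Int × Int := ([1, 2, 3], 7)

def Spec_ex2ModArray (A : List Int) (B : Int) (out : Int) : Prop := out = ex2ModArray_alt A B
instance (A : List Int) (B : Int) (out : Int) : Decidable (Spec_ex2ModArray A B out) := by unfold Spec_ex2ModArray; infer_instance

-- ===== CLAIM (what is proved, stated in full; the proofs are below) =====
def Claim_equal_ex2ModArray : Prop := ∀ (A : List Int) (B : Int), Dom_ex2ModArray A B → Pre_ex2ModArray A B → Spec_ex2ModArray A B (ex2ModArray A B)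

-- ===== LEMMAS AND PROOFS =====

-- the plain (un-reduced) integer value of the digit list, Horner style
def pvNumFrom (a : Int) (xs : List Int) : Int := xs.foldl (fun v d => v * 10 + d) a

theorem pvNumFrom_shift (xs : List Int) : ∀ a : Int,
    pvNumFrom a xs = a * 10 ^ xs.length + pvNumFrom 0 xs := by
  induction xs with
  | nil => intro a; simp [pvNumFrom]
  | cons d xs ih =>
      intro a
      show pvNumFrom (a * 10 + d) xs = a * 10 ^ (xs.length + 1) + pvNumFrom (0 * 10 + d) xs
      rw [ih (a * 10 + d), ih (0 * 10 + d)]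
      ring

-- Python's `%` (fmod) only depends on the argument modulo B
theorem pvFmod_congr {B x y : Int} (h : B ∣ x - y) : Int.fmod x B = Int.fmod y B := by
  obtain ⟨k, hk⟩ := h
  have hx : x = y + B * k := by linarith
  rw [hx, Int.add_mul_fmod_self_left]

theorem pvDvd_fmod_sub (B x : Int) : B ∣ Int.fmod x B - x := by
  have h := Int.fmod_add_mul_fdiv x B
  exact ⟨-(x.fdiv B), by linarith⟩

-- invariant of A's right-to-left loop, as a foldr over the digit list:
-- exp ≡ 10^len (mod B) and ans = value mod B
theorem pvAloop_inv (B : Int) (xs : List Int) :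
    B ∣ (xs.foldr (fun d (p : Int × Int) =>
          (PySem.Int.mod (p.1 * 10) B,
           PySem.Int.mod (p.2 + p.1 * PySem.Int.mod d B) B)) (1, 0)).1 - 10 ^ xs.length ∧
    (xs.foldr (fun d (p : Int × Int) =>
          (PySem.Int.mod (p.1 * 10) B,
           PySem.Int.mod (p.2 + p.1 * PySem.Int.mod d B) B)) (1, 0)).2
      = Int.fmod (pvNumFrom 0 xs) B := by
  induction xs with
  | nil => simp [pvNumFrom]
  | cons d xs ih =>
      obtain ⟨he, ha⟩ := ih
      set st := xs.foldr (fun d (p : Int × Int) =>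
          (PySem.Int.mod (p.1 * 10) B,
           PySem.Int.mod (p.2 + p.1 * PySem.Int.mod d B) B)) (1, 0) with hst
      constructor
      · show B ∣ Int.fmod (st.1 * 10) B - 10 ^ (xs.length + 1)
        have h1 : B ∣ Int.fmod (st.1 * 10) B - st.1 * 10 := pvDvd_fmod_sub B _
        have h2 : B ∣ st.1 * 10 - 10 ^ (xs.length + 1) := by
          have := Dvd.dvd.mul_right he 10
          calc B ∣ (st.1 - 10 ^ xs.length) * 10 := this
            _ = st.1 * 10 - 10 ^ (xs.length + 1) := by ring
        have := Int.dvd_add h1 h2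
        simpa using this
      · show Int.fmod (st.2 + st.1 * PySem.Int.mod d B) B = Int.fmod (pvNumFrom 0 (d :: xs)) B
        have hval : pvNumFrom 0 (d :: xs) = d * 10 ^ xs.length + pvNumFrom 0 xs := by
          show pvNumFrom (0 * 10 + d) xs = _
          rw [pvNumFrom_shift xs (0 * 10 + d)]; ring
        apply pvFmod_congr
        rw [hval]
        have h1 : B ∣ st.2 - pvNumFrom 0 xs := by
          rw [ha]; exact pvDvd_fmod_sub B _
        have h2 : B ∣ PySem.Int.mod d B - d := pvDvd_fmod_sub B d
        have h3 : B ∣ st.1 * PySem.Int.mod d B - d * 10 ^ xs.length := by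
          have := Int.dvd_add (Dvd.dvd.mul_left h2 st.1) (Dvd.dvd.mul_left he d)
          calc B ∣ st.1 * (PySem.Int.mod d B - d) + d * (st.1 - 10 ^ xs.length) := this
            _ = st.1 * PySem.Int.mod d B - d * 10 ^ xs.length := by ring
        have := Int.dvd_add h1 h3
        calc B ∣ st.2 - pvNumFrom 0 xs + (st.1 * PySem.Int.mod d B - d * 10 ^ xs.length) := this
          _ = st.2 + st.1 * PySem.Int.mod d B - (d * 10 ^ xs.length + pvNumFrom 0 xs) := by ring

-- A's port equals value-mod-B
theorem pvA_eq (A : List Int) (B : Int) :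
    ex2ModArray A B = Int.fmod (pvNumFrom 0 A) B := by
  show ((PySem.List.pyRange ((A.length : Int) - 1) (-1) (-1)).foldl
    (fun (p : Int × Int) i =>
      (PySem.Int.mod (p.1 * 10) B,
       PySem.Int.mod (p.2 + p.1 * PySem.Int.mod (PySem.List.pyGetD A i 0) B) B))
    (1, 0)).2 = Int.fmod (pvNumFrom 0 A) B
  have hr : PySem.List.pyRange ((A.length : Int) - 1) (-1) (-1)
      = (PySem.List.pyRange 0 (A.length : Int) 1).reverse := by
    have := PySem.List.pyRange_neg_one_eq_reverse ((A.length : Int) - 1) (-1)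
    simpa using this
  rw [hr, List.foldl_reverse]
  have hm : (PySem.List.pyRange 0 (A.length : Int) 1).map
      (fun j => PySem.List.pyGetD A j 0) = A := PySem.List.map_pyGetD_pyRange_zero' A 0
  have key : (PySem.List.pyRange 0 (A.length : Int) 1).foldr
      (fun x (y : Int × Int) =>
        (PySem.Int.mod (y.1 * 10) B,
         PySem.Int.mod (y.2 + y.1 * PySem.Int.mod (PySem.List.pyGetD A x 0) B) B)) (1, 0)
      = A.foldr (fun d (p : Int × Int) =>
        (PySem.Int.mod (p.1 * 10) B,
         PySem.Int.mod (p.2 + p.1 * PySem.Int.mod d B) B)) (1, 0) := by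
    conv_rhs => rw [← hm]
    rw [List.foldr_map]
  rw [key]
  exact (pvAloop_inv B A).2

-- invariant of B's Horner loop
theorem pvBloop_inv (B : Int) (xs : List Int) : ∀ a : Int,
    xs.foldl (fun ans d => PySem.Int.mod (ans * 10 + d) B) (Int.fmod a B)
      = Int.fmod (pvNumFrom a xs) B := by
  induction xs with
  | nil => intro a; simp [pvNumFrom]
  | cons d xs ih =>
      intro a
      show xs.foldl _ (PySem.Int.mod (Int.fmod a B * 10 + d) B) = Int.fmod (pvNumFrom (a * 10 + d) xs) B
      have h : PySem.Int.mod (Int.fmod a B * 10 + d) B = Int.fmod (a * 10 + d) B := by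
        apply pvFmod_congr
        have := Dvd.dvd.mul_right (pvDvd_fmod_sub B a) 10
        calc B ∣ (Int.fmod a B - a) * 10 := this
          _ = Int.fmod a B * 10 + d - (a * 10 + d) := by ring
      rw [h]
      exact ih (a * 10 + d)

theorem pvB_eq (A : List Int) (B : Int) :
    ex2ModArray_alt A B = Int.fmod (pvNumFrom 0 A) B := by
  cases A with
  | nil => simp [ex2ModArray_alt, pvNumFrom]
  | cons d xs =>
      show xs.foldl (fun ans d => PySem.Int.mod (ans * 10 + d) B) (PySem.Int.mod (0 * 10 + d) B)
        = Int.fmod (pvNumFrom 0 (d :: xs)) B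
      exact pvBloop_inv B xs (0 * 10 + d)

-- ===== VERDICT (by name: the statement is the Claim_ definition above) =====
theorem ex2ModArray_spec : Claim_equal_ex2ModArray := by
  intro A B _ _
  show ex2ModArray A B = ex2ModArray_alt A B
  rw [pvA_eq, pvB_eq]
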